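-- pv_equiv track=rewrite | github.com/khatrihemang07/CS639-Program-Analysis-Verification-and-Testing | assignment_4/Chiron-Framework/KachuaCore/example/a.py | calculate_min_budget
-- ===== SOURCE A (Python) =====
-- def calculate_min_budget(projects):
--     projects.sort(key=lambda x: x[1] - x[2])
--     min_budget = 0
--     current_budget = 0
--
--     for project in projects:
--         expenditure, bonus, penalty = project
--         current_budget += expenditure
--         min_budget = max(min_budget, current_budget + max(0, -penalty))
--
--     return min_budget
-- ===== SOURCE B (Python) =====
-- def _solve(ps):
--     # (sum of expenditures in ps, max over nonempty prefixes of prefix_sum + max(0, -penalty))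
--     if len(ps) == 1:
--         e, b, p = ps[0]
--         return e, e + max(0, -p)
--     mid = len(ps) // 2
--     s1, m1 = _solve(ps[:mid])
--     s2, m2 = _solve(ps[mid:])
--     return s1 + s2, max(m1, s1 + m2)
--
-- def calculate_min_budget(projects):
--     # Same observable mutation as A: sorts the argument in place by bonus - penalty.
--     projects.sort(key=lambda x: x[1] - x[2])
--     if not projects:
--         return 0
--     return max(0, _solve(projects)[1])
-- ===== Notes on version B (the rewrite author's own statement) =====
-- stated objective: alternative
-- what changed: A's single fused forward loop (running prefix sum + running max) is replaced by a divide-and-conquer recursion that splits the sorted list in half and combines (expenditure-sum, best-prefix-value) pairs via max(m1, s1+m2).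
import Mathlib
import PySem

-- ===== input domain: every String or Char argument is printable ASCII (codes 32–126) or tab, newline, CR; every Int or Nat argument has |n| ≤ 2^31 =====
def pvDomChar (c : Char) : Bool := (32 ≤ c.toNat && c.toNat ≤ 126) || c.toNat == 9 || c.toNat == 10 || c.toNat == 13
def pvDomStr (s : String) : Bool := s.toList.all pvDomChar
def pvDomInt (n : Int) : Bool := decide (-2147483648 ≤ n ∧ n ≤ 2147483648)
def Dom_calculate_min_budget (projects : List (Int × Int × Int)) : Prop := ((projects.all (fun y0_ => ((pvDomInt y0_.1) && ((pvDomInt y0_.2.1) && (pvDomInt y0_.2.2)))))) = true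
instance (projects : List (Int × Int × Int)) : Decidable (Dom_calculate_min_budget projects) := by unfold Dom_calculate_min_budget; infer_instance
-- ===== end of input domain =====

-- B replaces A's fused forward prefix-sum/max loop with a divide-and-conquer recursion combining
-- (sum, best-prefix) pairs over the same sorted list (alternative decomposition; return-value
-- equivalence — like A, the Python B sorts its argument in place, the same mutation).


-- ===== PORT A =====
def calculate_min_budget (projects : List (Int × Int × Int)) : Int :=
  let sortedProjects := PySem.List.sorted projects (fun x => x.2.1 - x.2.2)
  (sortedProjects.foldl
    (fun (st : Int × Int) project =>
      let current_budget := st.2 + project.1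
      (max st.1 (current_budget + max 0 (-project.2.2)), current_budget))
    (0, 0)).1

-- ===== PORT B =====
-- _solve: divide and conquer on the list (Python slices ps[:mid]/ps[mid:] = take/drop)
def pvSolve : List (Int × Int × Int) → Int × Int
  | [] => (0, 0)       -- unreachable: Python only calls _solve on nonempty lists
  | [x] => (x.1, x.1 + max 0 (-x.2.2))
  | a :: b :: t =>
    let l := a :: b :: t
    let mid := l.length / 2
    let r1 := pvSolve (l.take mid)
    let r2 := pvSolve (l.drop mid)
    (r1.1 + r2.1, max r1.2 (r1.1 + r2.2))
termination_by l => l.length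
decreasing_by
  · simp [List.length_take]; omega
  · simp [List.length_drop]; omega

def calculate_min_budget_alt (projects : List (Int × Int × Int)) : Int :=
  let sortedProjects := PySem.List.sorted projects (fun x => x.2.1 - x.2.2)
  match sortedProjects with
  | [] => 0
  | _ => max 0 (pvSolve sortedProjects).2

-- ===== PRECONDITION & SPEC =====
def Spec_calculate_min_budget (projects : List (Int × Int × Int)) (out : Int) : Prop := out = calculate_min_budget_alt projects
instance (projects : List (Int × Int × Int)) (out : Int) : Decidable (Spec_calculate_min_budget projects out) := by unfold Spec_calculate_min_budget; infer_instance

-- ===== CLAIM (what is proved, stated in full; the proofs are below) =====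
def Claim_equal_calculate_min_budget : Prop := ∀ (projects : List (Int × Int × Int)), Dom_calculate_min_budget projects → Spec_calculate_min_budget projects (calculate_min_budget projects)

-- ===== LEMMAS AND PROOFS =====

-- A's loop step, named.
def pvStepA (st : Int × Int) (project : Int × Int × Int) : Int × Int :=
  let current_budget := st.2 + project.1
  (max st.1 (current_budget + max 0 (-project.2.2)), current_budget)

-- max over nonempty prefixes of (prefix expenditure sum + max 0 (-penalty of last element))
def pvMaxPref : List (Int × Int × Int) → Int
  | [] => 0
  | [x] => x.1 + max 0 (-x.2.2)
  | x :: y :: t => max (x.1 + max 0 (-x.2.2)) (x.1 + pvMaxPref (y :: t))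

-- A's fold computes max b (c + pvMaxPref l) on nonempty l
theorem pvFoldA (l : List (Int × Int × Int)) : ∀ b c : Int, l ≠ [] →
    (l.foldl pvStepA (b, c)).1 = max b (c + pvMaxPref l) := by
  induction l with
  | nil => simp
  | cons x t ih =>
      intro b c _
      cases t with
      | nil => simp [pvStepA, pvMaxPref]; ring_nf
      | cons y t' =>
          have hx : pvStepA (b, c) x = (max b (c + x.1 + max 0 (-x.2.2)), c + x.1) := rfl
          rw [List.foldl_cons, hx, ih _ _ (by simp)]
          simp only [pvMaxPref]
          omega

-- pvMaxPref over an append of nonempty lists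
theorem pvMaxPref_append (l1 l2 : List (Int × Int × Int)) (h1 : l1 ≠ []) (h2 : l2 ≠ []) :
    pvMaxPref (l1 ++ l2) = max (pvMaxPref l1) ((l1.map (fun p => p.1)).sum + pvMaxPref l2) := by
  induction l1 with
  | nil => simp at h1
  | cons x t ih =>
      cases t with
      | nil =>
          cases l2 with
          | nil => simp at h2
          | cons y t2 => simp [pvMaxPref]
      | cons y t' =>
          simp only [List.cons_append]
          simp only [pvMaxPref]
          rw [show y :: (t' ++ l2) = (y :: t') ++ l2 from rfl, ih (by simp)]
          simp only [List.map_cons, List.sum_cons]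
          omega

-- pvSolve computes (sum of expenditures, pvMaxPref) on nonempty lists
theorem pvSolve_eq_aux : ∀ n : Nat, ∀ l : List (Int × Int × Int), l.length ≤ n → l ≠ [] →
    pvSolve l = ((l.map (fun p => p.1)).sum, pvMaxPref l) := by
  intro n
  induction n with
  | zero =>
      intro l hl hne
      cases l with
      | nil => exact absurd rfl hne
      | cons x t => simp at hl
  | succ n ih =>
      intro l hl hne
      match l with
      | [x] => simp [pvSolve, pvMaxPref]
      | a :: b :: t =>
          simp only [pvSolve]
          have hth : (a :: b :: t).take ((a :: b :: t).length / 2) ≠ [] := by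
            intro h
            have := congrArg List.length h
            simp [List.length_take] at this
          have hdh : (a :: b :: t).drop ((a :: b :: t).length / 2) ≠ [] := by
            intro h
            have := congrArg List.length h
            simp [List.length_drop] at this
            omega
          have h1 : ((a :: b :: t).take ((a :: b :: t).length / 2)).length ≤ n := by
            simp only [List.length_take, List.length_cons] at *
            omega
          have h2 : ((a :: b :: t).drop ((a :: b :: t).length / 2)).length ≤ n := by
            simp only [List.length_drop, List.length_cons] at *
            omega
          rw [ih _ h1 hth, ih _ h2 hdh]
          have happ : (a :: b :: t).take ((a :: b :: t).length / 2)
              ++ (a :: b :: t).drop ((a :: b :: t).length / 2) = (a :: b :: t) :=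
            List.take_append_drop _ _
          have hm := pvMaxPref_append _ _ hth hdh
          rw [happ] at hm
          refine Prod.ext ?_ ?_
          · show _ = (((a :: b :: t).map (fun p => p.1)).sum : Int)
            conv_rhs => rw [← happ]
            simp
          · show _ = pvMaxPref (a :: b :: t)
            rw [hm]

theorem pvSolve_eq (l : List (Int × Int × Int)) (hne : l ≠ []) :
    pvSolve l = ((l.map (fun p => p.1)).sum, pvMaxPref l) :=
  pvSolve_eq_aux l.length l le_rfl hne

-- A's fold from (0,0) equals B's empty-check-then-solve, on any list
theorem pvMain (s : List (Int × Int × Int)) :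
    (s.foldl pvStepA (0, 0)).1
      = (match s with | [] => (0 : Int) | _ => max 0 (pvSolve s).2) := by
  cases s with
  | nil => rfl
  | cons x t =>
      have hA := pvFoldA (x :: t) 0 0 (by simp)
      have hB := pvSolve_eq (x :: t) (by simp)

      rw [hA, hB]
      simp

-- ===== VERDICT (by name: the statement is the Claim_ definition above) =====
theorem calculate_min_budget_spec : Claim_equal_calculate_min_budget := by
  intro projects _
  exact pvMain (PySem.List.sorted projects (fun x => x.2.1 - x.2.2))
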